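-- pv_equiv track=rewrite | github.com/da-steve101/twn_generator | twn_generator/add_ops.py | create_normal_add_op
-- ===== SOURCE A (Python) =====
-- def create_normal_add_op( names, op_code, shifts, BW_in, BW_out, module_name, reset_name, depth ):
--     '''
--     Creates an add or subtract operation
--     names = [ out_name, a_name, b_name, c_name ]
--     op_code = 0 -> - a - b - c
--     op_code = 1 -> - a - b + c
--     op_code = 2 -> - a + b - c
--     op_code = 3 -> - a + b + c
--     op_code = 4 ->   a - b - c
--     op_code = 5 ->   a - b + c
--     op_code = 6 ->   a + b - c
--     op_code = 7 ->   a + b + c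
--     shifts = [ shift_a, shift_b, shift_c ]
--     BW_in -> the bitwidth of the input
--     BW_out -> the bitwidth of the output
--     module_name -> the name to call the adder
--     reset_name -> the reset to use, will assert the reset on the cycle before use ( not used in this op )
--     depth -> how deep the op is down the tree, inputs have a depth of 0 ( not used in this op )
--     '''
--     op_str = ""
--     op_mod = 4
--     for n, s in zip( names[1:], shifts ):
--         if op_code < op_mod:
--             op_str += " - "
--         elif op_mod != 4:
--             op_str += " + "
--         op_code = op_code % op_mod
--         op_mod = op_mod >> 1
--         op_str += "( $signed( " + n + " ) "
--         if s < 0: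
--             op_str += " >> " + str( - s ) + " )"
--         elif s > 0:
--             op_str += " << " + str( s ) + " )"
--         else:
--             op_str += ")"
--     add_op = '''reg [''' + str( BW_in - 1 ) + ":0] " + names[0] + ''';
-- always @( posedge clock ) begin
-- ''' + names[0] + " <= " + op_str + ''';
-- end
-- '''
--     return add_op, BW_in
-- ===== SOURCE B (Python) =====
-- def _term(n, s):
--     if s < 0:
--         return "( $signed( " + n + " )  >> " + str(-s) + " )"
--     if s > 0:
--         return "( $signed( " + n + " )  << " + str(s) + " )"
--     return "( $signed( " + n + " ) )"
--
--
-- def _expr(terms, pluses):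
--     # recursive rendering: EVERY term carries an explicit ' + '/' - ' sign
--     if not terms:
--         return ""
--     n, s = terms[0]
--     sign = " + " if pluses[0] else " - "
--     return sign + _term(n, s) + _expr(terms[1:], pluses[1:])
--
--
-- def create_normal_add_op(names, op_code, shifts, BW_in, BW_out, module_name, reset_name, depth):
--     # signs of the (at most three) terms, decoded once from op_code
--     pluses = [op_code >= 4, op_code % 4 >= 2, op_code % 2 == 1]
--     expr = _expr(list(zip(names[1:], shifts)), pluses)
--     # the leading positive term has no sign in the output: strip it afterwards
--     if expr.startswith(" + "):
--         expr = expr[3:]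
--     add_op = ("reg [" + str(BW_in - 1) + ":0] " + names[0]
--               + ";\nalways @( posedge clock ) begin\n"
--               + names[0] + " <= " + expr + ";\nend\n")
--     return add_op, BW_in
-- ===== Notes on version B (the rewrite author's own statement) =====
-- stated objective: alternative
-- what changed: B decodes the three term signs from op_code up front, renders the expression by structural recursion over the term list with an explicit ' + '/' - ' sign on EVERY term, and strips a leading ' + ' afterwards, instead of A's imperative loop threading a running op_code/op_mod divisor state with an in-loop first-term special case.
import Mathlib
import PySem

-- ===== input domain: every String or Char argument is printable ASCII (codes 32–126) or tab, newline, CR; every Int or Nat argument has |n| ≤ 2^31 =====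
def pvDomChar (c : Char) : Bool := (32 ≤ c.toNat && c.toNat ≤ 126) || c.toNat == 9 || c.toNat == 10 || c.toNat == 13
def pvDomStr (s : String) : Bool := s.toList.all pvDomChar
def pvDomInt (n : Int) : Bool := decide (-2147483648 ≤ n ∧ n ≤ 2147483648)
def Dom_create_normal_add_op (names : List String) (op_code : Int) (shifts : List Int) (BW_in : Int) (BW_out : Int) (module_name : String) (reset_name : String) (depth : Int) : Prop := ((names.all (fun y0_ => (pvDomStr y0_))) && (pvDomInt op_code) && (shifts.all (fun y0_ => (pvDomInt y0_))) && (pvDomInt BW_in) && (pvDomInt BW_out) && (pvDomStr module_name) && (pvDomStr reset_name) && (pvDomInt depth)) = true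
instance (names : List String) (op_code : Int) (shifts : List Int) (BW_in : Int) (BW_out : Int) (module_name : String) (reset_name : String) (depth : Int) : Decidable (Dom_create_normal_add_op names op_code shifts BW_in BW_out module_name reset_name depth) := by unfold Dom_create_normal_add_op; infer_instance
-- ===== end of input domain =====

-- B decodes the term signs from op_code up front, renders the expression by
-- recursion with an explicit sign on every term and strips a leading ' + '
-- afterwards, instead of A's loop threading op_code/op_mod state with an
-- in-loop first-term special case (objective: alternative).


-- ===== PORT A =====
-- A's loop over zip(names[1:], shifts), threading (op_str, op_code, op_mod);
-- strings built on List Char (Lean's String.append is kernel-opaque).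
def aLoop (ts : List (String × Int)) (op_str : List Char) (op_code op_mod : Int) :
    List Char :=
  match ts with
  | [] => op_str
  | (n, s) :: rest =>
    let op_str :=
      if op_code < op_mod then op_str ++ (" - ").toList
      else if op_mod ≠ 4 then op_str ++ (" + ").toList
      else op_str
    let op_code := PySem.Int.mod op_code op_mod
    let op_mod := op_mod >>> (1 : Nat)
    let op_str := op_str ++ ("( $signed( ").toList ++ n.toList ++ (" ) ").toList
    let op_str :=
      if s < 0 then op_str ++ (" >> ").toList ++ PySem.Int.toChars (-s) ++ (" )").toList
      else if s > 0 then op_str ++ (" << ").toList ++ PySem.Int.toChars s ++ (" )").toList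
      else op_str ++ (")").toList
    aLoop rest op_str op_code op_mod

def create_normal_add_op (names : List String) (op_code : Int) (shifts : List Int) (BW_in : Int) (BW_out : Int) (module_name : String) (reset_name : String) (depth : Int) : String × Int :=
  let op_str := aLoop (List.zip (names.drop 1) shifts) [] op_code 4
  let n0 := (names.headD "").toList
  let add_op :=
    ("reg [").toList ++ PySem.Int.toChars (BW_in - 1) ++ (":0] ").toList ++ n0 ++
    (";\nalways @( posedge clock ) begin\n").toList ++ n0 ++ (" <= ").toList ++
    op_str ++ (";\nend\n").toList
  (String.ofList add_op, BW_in)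

-- ===== PORT B =====
-- helper _term of Source B
def bTerm (n : String) (s : Int) : List Char :=
  if s < 0 then ("( $signed( ").toList ++ n.toList ++ (" )  >> ").toList ++ PySem.Int.toChars (-s) ++ (" )").toList
  else if s > 0 then ("( $signed( ").toList ++ n.toList ++ (" )  << ").toList ++ PySem.Int.toChars s ++ (" )").toList
  else ("( $signed( ").toList ++ n.toList ++ (" ) )").toList

-- helper _expr of Source B: recursion over the zipped terms, one explicit sign per term.
-- (When terms outlast pluses, Source B raises IndexError — outside Pre_; [] here.)
def bExpr : List (String × Int) → List Bool → List Char
  | [], _ => []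
  | (n, s) :: rest, p :: ps =>
    (if p then (" + ").toList else (" - ").toList) ++ bTerm n s ++ bExpr rest ps
  | _ :: _, [] => []

def create_normal_add_op_alt (names : List String) (op_code : Int) (shifts : List Int) (BW_in : Int) (BW_out : Int) (module_name : String) (reset_name : String) (depth : Int) : String × Int :=
  let pluses : List Bool :=
    [decide (op_code ≥ 4), decide (PySem.Int.mod op_code 4 ≥ 2),
     decide (PySem.Int.mod op_code 2 = 1)]
  let expr := bExpr (List.zip (names.drop 1) shifts) pluses
  -- expr.startswith(" + ") → drop it
  let expr := if (" + ").toList.isPrefixOf expr then expr.drop 3 else expr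
  let n0 := (names.headD "").toList
  let add_op :=
    ("reg [").toList ++ PySem.Int.toChars (BW_in - 1) ++ (":0] ").toList ++ n0 ++
    (";\nalways @( posedge clock ) begin\n").toList ++ n0 ++ (" <= ").toList ++
    expr ++ (";\nend\n").toList
  (String.ofList add_op, BW_in)

-- ===== PRECONDITION & SPEC =====
-- Pre_ excludes inputs on which Python A raises: names = [] (IndexError on names[0])
-- and a zip of names[1:] with shifts longer than 3 (op_mod reaches 0, so op_code % op_mod
-- raises ZeroDivisionError on the 4th iteration).
def Pre_create_normal_add_op (names : List String) (op_code : Int) (shifts : List Int) (BW_in : Int) (BW_out : Int) (module_name : String) (reset_name : String) (depth : Int) : Prop :=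
  names.length ≠ 0 ∧ min (names.length - 1) shifts.length ≤ 3
instance (names : List String) (op_code : Int) (shifts : List Int) (BW_in : Int) (BW_out : Int) (module_name : String) (reset_name : String) (depth : Int) : Decidable (Pre_create_normal_add_op names op_code shifts BW_in BW_out module_name reset_name depth) := by unfold Pre_create_normal_add_op; infer_instance

def pvWitness_create_normal_add_op : List String × Int × List Int × Int × Int × String × String × Int :=
  (["out", "a", "b", "c"], 5, [1, -2, 0], 8, 9, "m", "rst", 2)

def Spec_create_normal_add_op (names : List String) (op_code : Int) (shifts : List Int) (BW_in : Int) (BW_out : Int) (module_name : String) (reset_name : String) (depth : Int) (out : String × Int) : Prop := out = create_normal_add_op_alt names op_code shifts BW_in BW_out module_name reset_name depth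
instance (names : List String) (op_code : Int) (shifts : List Int) (BW_in : Int) (BW_out : Int) (module_name : String) (reset_name : String) (depth : Int) (out : String × Int) : Decidable (Spec_create_normal_add_op names op_code shifts BW_in BW_out module_name reset_name depth out) := by unfold Spec_create_normal_add_op; infer_instance

-- ===== CLAIM (what is proved, stated in full; the proofs are below) =====
def Claim_equal_create_normal_add_op : Prop := ∀ (names : List String) (op_code : Int) (shifts : List Int) (BW_in : Int) (BW_out : Int) (module_name : String) (reset_name : String) (depth : Int), Dom_create_normal_add_op names op_code shifts BW_in BW_out module_name reset_name depth → Pre_create_normal_add_op names op_code shifts BW_in BW_out module_name reset_name depth → Spec_create_normal_add_op names op_code shifts BW_in BW_out module_name reset_name depth (create_normal_add_op names op_code shifts BW_in BW_out module_name reset_name depth)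

-- ===== LEMMAS AND PROOFS =====

theorem aLoop_nil (opstr : List Char) (opc opm : Int) :
    aLoop [] opstr opc opm = opstr := rfl

-- one unfolding step of A's loop, with the let-bound state written out
theorem aLoop_cons (n : String) (s : Int) (rest : List (String × Int))
    (opstr : List Char) (opc opm : Int) :
    aLoop ((n, s) :: rest) opstr opc opm =
      aLoop rest
        (if s < 0 then
          ((if opc < opm then opstr ++ (" - ").toList
            else if opm ≠ 4 then opstr ++ (" + ").toList else opstr) ++
            ("( $signed( ").toList ++ n.toList ++ (" ) ").toList) ++
            (" >> ").toList ++ PySem.Int.toChars (-s) ++ (" )").toList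
         else if s > 0 then
          ((if opc < opm then opstr ++ (" - ").toList
            else if opm ≠ 4 then opstr ++ (" + ").toList else opstr) ++
            ("( $signed( ").toList ++ n.toList ++ (" ) ").toList) ++
            (" << ").toList ++ PySem.Int.toChars s ++ (" )").toList
         else
          ((if opc < opm then opstr ++ (" - ").toList
            else if opm ≠ 4 then opstr ++ (" + ").toList else opstr) ++
            ("( $signed( ").toList ++ n.toList ++ (" ) ").toList) ++ (")").toList)
        (PySem.Int.mod opc opm) (opm >>> (1 : Nat)) := rfl

-- the term body of one loop iteration of A is acc ++ bTerm n s (same shift formatting)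
theorem aLoop_term_eq (n : String) (s : Int) (acc : List Char) :
    (if s < 0 then (acc ++ ("( $signed( ").toList ++ n.toList ++ (" ) ").toList) ++ (" >> ").toList ++ PySem.Int.toChars (-s) ++ (" )").toList
     else if s > 0 then (acc ++ ("( $signed( ").toList ++ n.toList ++ (" ) ").toList) ++ (" << ").toList ++ PySem.Int.toChars s ++ (" )").toList
     else (acc ++ ("( $signed( ").toList ++ n.toList ++ (" ) ").toList) ++ (")").toList)
    = acc ++ bTerm n s := by
  unfold bTerm
  split_ifs <;> simp

-- the strip step applied to B's recursive rendering: the leading ' + ' of a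
-- plus-signed first term disappears, a minus-signed first term is untouched
theorem strip_cons (p : Bool) (n : String) (s : Int) (rest : List (String × Int))
    (ps : List Bool) :
    (if (" + ").toList.isPrefixOf (bExpr ((n, s) :: rest) (p :: ps)) then
      (bExpr ((n, s) :: rest) (p :: ps)).drop 3
     else bExpr ((n, s) :: rest) (p :: ps)) =
    (if p then [] else (" - ").toList) ++ bTerm n s ++ bExpr rest ps := by
  cases p <;> simp [bExpr, List.isPrefixOf]

-- the core equality: over a zipped list of at most 3 terms, A's stateful loop
-- produces exactly B's uniformly-signed recursion with the leading ' + ' stripped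
theorem loop_eq (ts : List (String × Int)) (op_code : Int) (h : ts.length ≤ 3) :
    aLoop ts [] op_code 4 =
      (if (" + ").toList.isPrefixOf
            (bExpr ts [decide (op_code ≥ 4), decide (PySem.Int.mod op_code 4 ≥ 2),
                       decide (PySem.Int.mod op_code 2 = 1)]) then
        (bExpr ts [decide (op_code ≥ 4), decide (PySem.Int.mod op_code 4 ≥ 2),
                   decide (PySem.Int.mod op_code 2 = 1)]).drop 3
       else
        bExpr ts [decide (op_code ≥ 4), decide (PySem.Int.mod op_code 4 ≥ 2),
                  decide (PySem.Int.mod op_code 2 = 1)]) := by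
  have h4 : PySem.Int.mod op_code 4 = op_code % 4 :=
    PySem.Int.mod_eq_emod_of_pos (by norm_num)
  have h2 : PySem.Int.mod op_code 2 = op_code % 2 :=
    PySem.Int.mod_eq_emod_of_pos (by norm_num)
  have h42 : PySem.Int.mod (op_code % 4) 2 = (op_code % 4) % 2 :=
    PySem.Int.mod_eq_emod_of_pos (by norm_num)
  have hs1 : ((4 : Int) >>> (1 : Nat)) = 2 := by decide
  have hs2 : ((2 : Int) >>> (1 : Nat)) = 1 := by decide
  have hb : 0 ≤ op_code % 4 ∧ op_code % 4 < 4 := ⟨Int.emod_nonneg _ (by norm_num),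
    Int.emod_lt_of_pos _ (by norm_num)⟩
  have hb2 : (op_code % 4) % 2 = op_code % 2 := Int.emod_emod_of_dvd _ (by norm_num)
  have hb3 : 0 ≤ op_code % 2 ∧ op_code % 2 < 2 := ⟨Int.emod_nonneg _ (by norm_num),
    Int.emod_lt_of_pos _ (by norm_num)⟩
  rcases ts with _ | ⟨⟨n1, s1⟩, _ | ⟨⟨n2, s2⟩, _ | ⟨⟨n3, s3⟩, rest⟩⟩⟩
  · simp [aLoop, bExpr]
  · rw [aLoop_cons, aLoop_nil, aLoop_term_eq n1 s1, strip_cons]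
    simp only [bExpr, List.append_nil]
    simp
    split_ifs <;> first | rfl | omega | (exfalso; omega) | simp
  · rw [aLoop_cons, hs1, h4, aLoop_cons, aLoop_nil, aLoop_term_eq n2 s2,
      aLoop_term_eq n1 s1, strip_cons]
    simp only [bExpr, h4, h42, hb2, List.append_nil]
    simp
    split_ifs <;> first | rfl | omega | (exfalso; omega) | simp
  · rcases rest with _ | ⟨r, rest⟩
    · rw [aLoop_cons, hs1, h4, aLoop_cons, hs2, h42, hb2, aLoop_cons, aLoop_nil,
        aLoop_term_eq n3 s3, aLoop_term_eq n2 s2, aLoop_term_eq n1 s1, strip_cons]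
      simp only [bExpr, h4, h42, hb2, h2, List.append_nil]
      simp
      split_ifs <;> first | rfl | omega | (exfalso; omega) | simp
    · simp at h
      omega

-- ===== VERDICT (by name: the statement is the Claim_ definition above) =====
theorem create_normal_add_op_spec : Claim_equal_create_normal_add_op := by
  intro names op_code shifts BW_in BW_out module_name reset_name depth _ hpre
  unfold Spec_create_normal_add_op create_normal_add_op create_normal_add_op_alt
  obtain ⟨hne, hlen⟩ := hpre
  have hts : (List.zip (names.drop 1) shifts).length ≤ 3 := by
    simp only [List.length_zip, List.length_drop]
    omega
  rw [loop_eq _ op_code hts]
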